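-- pv_equiv track=rewrite | github.com/uni745e/AtCoder_answers | abc111/c_2.py | solve
-- ===== SOURCE A (Python) =====
-- from collections import Counter
--
-- def solve(N, V):
--     v_even = [V[i] for i in range(0, N, 2)]
--     v_odd = [V[i] for i in range(1, N, 2)]
--
--     # 出現回数の多い上位2つの要素と出現回数を取得
--     v_even_most = Counter(v_even).most_common()[:2]
--     v_odd_most = Counter(v_odd).most_common()[:2]
--
--     # 最頻値が被っていなければそのまま採用
--     if v_even_most[0][0] != v_odd_most[0][0]:
--         return N - v_even_most[0][1] - v_odd_most[0][1]
--     else: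
--         # 数字が1種類しか登場しない場合は、0を追加
--         # list index out of range対策
--         if len(v_even_most) == 1 or len(v_odd_most) == 1:
--             v_even_most.append((0, 0))
--             v_odd_most.append((0, 0))
--
--         # 書き換え回数が少ない方を採用
--         return N - max(v_even_most[0][1] + v_odd_most[1][1],
--                        v_even_most[1][1] + v_odd_most[0][1])
-- ===== SOURCE B (Python) =====
-- from collections import Counter
--
-- def solve(N, V):
--     # Linear prefix/suffix-maximum algorithm: no sorting, no most_common, no top-2
--     # extraction.  answer = N - max over value pairs (a, b), a != b, of
--     # count_even(a) + count_odd(b); the "max count over all values except the one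
--     # at index i" is read off prefix/suffix maximum arrays in O(1), and a value
--     # absent from a side (including a fresh value) contributes 0.
--     even = Counter(V[i] for i in range(0, N, 2))
--     odd = Counter(V[i] for i in range(1, N, 2))
--     keys = list(dict.fromkeys(list(even) + list(odd)))
--     k = len(keys)
--     f = [even[v] for v in keys]
--     g = [odd[v] for v in keys]
--     pref = [0] * (k + 1)          # pref[i] = max(f[:i], default 0)
--     for i in range(k):
--         pref[i + 1] = max(pref[i], f[i])
--     suf = [0] * (k + 1)           # suf[i] = max(f[i:], default 0)
--     for i in range(k - 1, -1, -1):
--         suf[i] = max(suf[i + 1], f[i])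
--     best = max(max(pref[i], suf[i + 1]) + g[i] for i in range(k))
--     return N - max(best, pref[k])  # pref[k]: odd side rewritten entirely to a fresh value
-- ===== Notes on version B (the rewrite author's own statement) =====
-- stated objective: alternative
-- what changed: A sorts each side's counter (most_common), takes the top-2 entries and branches on whether the two modes coincide; B never sorts or extracts top-2: it builds one deduplicated key list with prefix/suffix maximum arrays over the even counts and takes N minus the best count_even(a)+count_odd(b) over differing values in one linear pass.
import Mathlib
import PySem

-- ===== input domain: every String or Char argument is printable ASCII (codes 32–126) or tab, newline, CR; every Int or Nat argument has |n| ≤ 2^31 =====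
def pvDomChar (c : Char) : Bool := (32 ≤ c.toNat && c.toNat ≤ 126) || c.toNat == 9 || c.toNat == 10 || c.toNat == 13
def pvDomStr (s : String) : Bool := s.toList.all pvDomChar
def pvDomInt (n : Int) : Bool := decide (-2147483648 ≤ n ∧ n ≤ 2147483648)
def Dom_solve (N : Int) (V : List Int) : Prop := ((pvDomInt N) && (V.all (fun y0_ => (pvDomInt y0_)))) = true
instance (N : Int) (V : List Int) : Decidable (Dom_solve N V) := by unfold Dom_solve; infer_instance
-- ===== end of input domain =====

-- B replaces A's sort-by-count (most_common) + top-2 branch logic with a linear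
-- prefix/suffix-maximum scan over one deduplicated key list (objective: alternative).

-- ===== PORT A =====
-- Counter(xs).most_common(): items sorted by count, descending, stable
def mostCommon (xs : List Int) : List (Int × Int) :=
  PySem.List.sorted (PySem.Dict.counter xs).items (fun p => p.2) true

-- A's decision logic on the two (already-sliced) top-2 lists
def pickA (N : Int) (em om : List (Int × Int)) : Int :=
  match em, om with
  | e0 :: etl, o0 :: otl =>
    if e0.1 ≠ o0.1 then N - e0.2 - o0.2
    else
      let p := if etl.length = 0 ∨ otl.length = 0
               then (em ++ [((0 : Int), (0 : Int))], om ++ [((0 : Int), (0 : Int))])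
               else (em, om)
      N - max ((p.1.headD (0, 0)).2 + ((p.2.drop 1).headD (0, 0)).2)
              (((p.1.drop 1).headD (0, 0)).2 + (p.2.headD (0, 0)).2)
  | _, _ => 0  -- Python raises IndexError here; excluded by Pre_solve

def solve (N : Int) (V : List Int) : Int :=
  let vEven := (PySem.List.pyRange 0 N 2).map (fun i => (PySem.List.pyGet? V i).getD 0)
  let vOdd := (PySem.List.pyRange 1 N 2).map (fun i => (PySem.List.pyGet? V i).getD 0)
  pickA N ((mostCommon vEven).take 2) ((mostCommon vOdd).take 2)

-- ===== PORT B =====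
-- Source B: no sorting, no top-2; prefix/suffix maxima of even counts over the dedup'd
-- key list, one linear pass maximising count_even(a) + count_odd(b) over a ≠ b
-- (the pref/suf arrays built by Source B's two index loops are the scanl of max).
def bestB (ev od : List Int) : Int :=
  let ce := PySem.Dict.counter ev
  let co := PySem.Dict.counter od
  let keys := PySem.List.dedup (ce.keys ++ co.keys)
  let k := keys.length
  let f := keys.map (fun v => ce.getD v 0)
  let g := keys.map (fun v => co.getD v 0)
  let pref := f.scanl max 0                       -- pref[i] = max(f[:i], default 0)
  let suf := (f.reverse.scanl max 0).reverse      -- suf[i]  = max(f[i:], default 0)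
  -- max(...) over the index generator: none = Python's ValueError on empty (outside Pre_solve)
  let best := (PySem.List.max?
      ((List.range k).map (fun i => max (pref.getD i 0) (suf.getD (i + 1) 0) + g.getD i 0))
      (fun x => x)).getD 0
  max best (pref.getD k 0)

def solve_alt (N : Int) (V : List Int) : Int :=
  let ev := (PySem.List.pyRange 0 N 2).map (fun i => (PySem.List.pyGet? V i).getD 0)
  let od := (PySem.List.pyRange 1 N 2).map (fun i => (PySem.List.pyGet? V i).getD 0)
  N - bestB ev od

-- ===== PRECONDITION & SPEC =====
-- Pre_solve is exactly where the Python A returns: N ≥ 2 (both position classes inhabited,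
-- else most_common()[0] raises IndexError) and N ≤ len(V) (else V[i] raises IndexError).
def Pre_solve (N : Int) (V : List Int) : Prop := 2 ≤ N ∧ N ≤ (V.length : Int)
instance (N : Int) (V : List Int) : Decidable (Pre_solve N V) := by unfold Pre_solve; infer_instance
def pvWitness_solve : Int × List Int := (4, [1, 2, 1, 3])

def Spec_solve (N : Int) (V : List Int) (out : Int) : Prop := out = solve_alt N V
instance (N : Int) (V : List Int) (out : Int) : Decidable (Spec_solve N V out) := by unfold Spec_solve; infer_instance

-- ===== CLAIM (what is proved, stated in full; the proofs are below) =====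
def Claim_equal_solve : Prop := ∀ (N : Int) (V : List Int), Dom_solve N V → Pre_solve N V → Spec_solve N V (solve N V)

-- ===== LEMMAS AND PROOFS =====

-- x is an achievable "kept elements" total: counts of a on the even side plus b ≠ a on the odd side
def AchSum (ev od : List Int) (x : Int) : Prop :=
  ∃ a b : Int, a ≠ b ∧ x = (ev.count a : Int) + (od.count b : Int)

def UBSum (ev od : List Int) (x : Int) : Prop :=
  ∀ a b : Int, a ≠ b → (ev.count a : Int) + (od.count b : Int) ≤ x

lemma ach_ub_unique {ev od : List Int} {x y : Int}
    (hax : AchSum ev od x) (hux : UBSum ev od x)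
    (hay : AchSum ev od y) (huy : UBSum ev od y) : x = y := by
  obtain ⟨a, b, hab, hx⟩ := hax
  obtain ⟨a', b', hab', hy⟩ := hay
  exact le_antisymm (hx ▸ huy a b hab) (hy ▸ hux a' b' hab')

-- foldl max toolbox
lemma le_foldl_max_init (l : List Int) (b : Int) : b ≤ l.foldl max b := by
  induction l generalizing b with
  | nil => simp
  | cons x xs ih => exact le_trans (le_max_left b x) (ih (max b x))

lemma le_foldl_max_mem (l : List Int) (b x : Int) (h : x ∈ l) : x ≤ l.foldl max b := by
  induction l generalizing b with
  | nil => simp at h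
  | cons y ys ih =>
    rcases List.mem_cons.mp h with rfl | h'
    · exact le_trans (le_max_right b x) (le_foldl_max_init ys _)
    · exact ih (max b y) h'

lemma foldl_max_cases (l : List Int) (b : Int) : l.foldl max b = b ∨ l.foldl max b ∈ l := by
  induction l generalizing b with
  | nil => left; rfl
  | cons x xs ih =>
    rcases ih (max b x) with h | h
    · simp only [List.foldl_cons, h]
      rcases max_choice b x with h' | h'
      · left; exact h'
      · right; simp [h']
    · right; simp [List.foldl_cons, h]

lemma exists_fresh (l : List Int) (a : Int) : ∃ b : Int, b ∉ l ∧ b ≠ a := by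
  refine ⟨max a (l.foldl max 0) + 1, fun hmem => ?_, by omega⟩
  have h1 := le_foldl_max_mem l 0 _ hmem
  omega

lemma count_int_zero {l : List Int} {a : Int} (h : a ∉ l) : (l.count a : Int) = 0 := by
  simp [List.count_eq_zero.mpr h]

-- scanl max characterisation
lemma scanl_max_getD (f : List Int) (b : Int) (i : Nat) (h : i ≤ f.length) :
    (f.scanl max b).getD i 0 = (f.take i).foldl max b := by
  induction f generalizing b i with
  | nil =>
    have hi : i = 0 := Nat.le_zero.mp h
    subst hi
    simp [List.scanl_nil]
  | cons x xs ih =>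
    cases i with
    | zero => simp [List.scanl_cons]
    | succ j =>
      simp only [List.scanl_cons, List.getD_cons_succ, List.take_succ_cons, List.foldl_cons]
      exact ih (max b x) j (by simpa using h)

-- ===== PORT A: characterisation =====
lemma mem_mostCommon_iff (xs : List Int) (p : Int × Int) :
    p ∈ mostCommon xs ↔ p.1 ∈ xs ∧ p.2 = (xs.count p.1 : Int) := by
  rw [mostCommon, PySem.List.mem_sorted, PySem.Dict.items_counter]
  constructor
  · intro h
    obtain ⟨v, hv, rfl⟩ := List.mem_map.mp h
    exact ⟨(PySem.Set.mem_ofList _ _).mp hv, rfl⟩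
  · intro ⟨h1, h2⟩
    refine List.mem_map.mpr ⟨p.1, (PySem.Set.mem_ofList _ _).mpr h1, ?_⟩
    exact Prod.ext rfl h2.symm

lemma mostCommon_ne_nil (xs : List Int) (h : xs ≠ []) : mostCommon xs ≠ [] := by
  rcases xs with _ | ⟨x, t⟩
  · exact absurd rfl h
  intro hc
  have hx : (x, ((x :: t).count x : Int)) ∈ mostCommon (x :: t) :=
    (mem_mostCommon_iff _ _).mpr ⟨by simp, rfl⟩
  rw [hc] at hx
  simp at hx

lemma mostCommon_pairwise (xs : List Int) : (mostCommon xs).Pairwise (fun a b => b.2 ≤ a.2) :=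
  PySem.List.sorted_pairwise_rev _ _

lemma mostCommon_nodup (xs : List Int) : ((mostCommon xs).map Prod.fst).Nodup := by
  have hperm : ((mostCommon xs).map Prod.fst).Perm ((PySem.Dict.counter xs).items.map Prod.fst) :=
    (PySem.List.sorted_perm _ _ _).map Prod.fst
  have : ((PySem.Dict.counter xs).items.map Prod.fst).Nodup := by
    rw [PySem.Dict.items_counter, List.map_map]
    rw [show (Prod.fst ∘ fun k : Int => (k, (List.count k xs : Int))) = id from rfl, List.map_id]
    exact PySem.Set.nodup_ofList xs
  exact hperm.nodup_iff.mpr this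

lemma mostCommon_pos (xs : List Int) : ∀ p ∈ mostCommon xs, 1 ≤ p.2 := by
  intro p hp
  obtain ⟨h1, h2⟩ := (mem_mostCommon_iff xs p).mp hp
  have := List.one_le_count_iff.mpr h1
  omega

lemma mc_top (xs : List Int) (p : Int × Int) (t : List (Int × Int))
    (h : mostCommon xs = p :: t) : ∀ v : Int, (xs.count v : Int) ≤ p.2 := by
  intro v
  have hpos : 1 ≤ p.2 := mostCommon_pos xs p (h ▸ List.mem_cons_self)
  by_cases hv : v ∈ xs
  · have hm : (v, (xs.count v : Int)) ∈ mostCommon xs := (mem_mostCommon_iff _ _).mpr ⟨hv, rfl⟩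
    rw [h] at hm
    rcases List.mem_cons.mp hm with he | hm'
    · exact le_of_eq (congrArg Prod.snd he)
    · have hpw := mostCommon_pairwise xs
      rw [h] at hpw
      exact (List.pairwise_cons.mp hpw).1 _ hm'
  · rw [count_int_zero hv]; omega

lemma mc_second (xs : List Int) (p q : Int × Int) (t : List (Int × Int))
    (h : mostCommon xs = p :: q :: t) :
    ∀ v : Int, v ≠ p.1 → (xs.count v : Int) ≤ q.2 := by
  intro v hv
  have hpos : 1 ≤ q.2 := mostCommon_pos xs q (h ▸ by simp)
  by_cases hvx : v ∈ xs
  · have hm : (v, (xs.count v : Int)) ∈ mostCommon xs := (mem_mostCommon_iff _ _).mpr ⟨hvx, rfl⟩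
    rw [h] at hm
    rcases List.mem_cons.mp hm with he | hm'
    · exact absurd (congrArg Prod.fst he) hv
    · rcases List.mem_cons.mp hm' with he | hm''
      · exact le_of_eq (congrArg Prod.snd he)
      · have hpw := mostCommon_pairwise xs
        rw [h] at hpw
        exact (List.pairwise_cons.mp (List.pairwise_cons.mp hpw).2).1 _ hm''
  · rw [count_int_zero hvx]; omega

lemma mc_single (xs : List Int) (p : Int × Int) (h : mostCommon xs = [p]) :
    ∀ v : Int, v ≠ p.1 → (xs.count v : Int) = 0 := by
  intro v hv
  by_cases hvx : v ∈ xs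
  · have hm : (v, (xs.count v : Int)) ∈ mostCommon xs := (mem_mostCommon_iff _ _).mpr ⟨hvx, rfl⟩
    rw [h] at hm
    exact absurd (congrArg Prod.fst (List.mem_singleton.mp hm)) hv
  · exact count_int_zero hvx

lemma mc_head (xs : List Int) (p : Int × Int) (t : List (Int × Int))
    (h : mostCommon xs = p :: t) : p.1 ∈ xs ∧ p.2 = (xs.count p.1 : Int) :=
  (mem_mostCommon_iff _ _).mp (h ▸ List.mem_cons_self)

lemma mc_snd_mem (xs : List Int) (p q : Int × Int) (t : List (Int × Int))
    (h : mostCommon xs = p :: q :: t) :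
    (q.1 ∈ xs ∧ q.2 = (xs.count q.1 : Int)) ∧ p.1 ≠ q.1 := by
  refine ⟨(mem_mostCommon_iff _ _).mp (h ▸ by simp), ?_⟩
  have hnd := mostCommon_nodup xs
  rw [h] at hnd
  simp at hnd
  exact hnd.1.1

-- A's branch value is an achievable sum and an upper bound of all sums
lemma pickA_ach_ub (N : Int) (ev od : List Int) (hev : ev ≠ []) (hod : od ≠ []) :
    ∃ X, pickA N ((mostCommon ev).take 2) ((mostCommon od).take 2) = N - X ∧
      AchSum ev od X ∧ UBSum ev od X := by
  rcases hE : mostCommon ev with _ | ⟨e0, E1⟩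
  · exact absurd hE (mostCommon_ne_nil ev hev)
  rcases hO : mostCommon od with _ | ⟨o0, O1⟩
  · exact absurd hO (mostCommon_ne_nil od hod)
  obtain ⟨he0m, he0c⟩ := mc_head ev e0 E1 hE
  obtain ⟨ho0m, ho0c⟩ := mc_head od o0 O1 hO
  have hetop := mc_top ev e0 E1 hE
  have hotop := mc_top od o0 O1 hO
  by_cases hne : e0.1 = o0.1
  case neg =>
    refine ⟨e0.2 + o0.2, by cases E1 <;> cases O1 <;> simp [pickA, hne] <;> ring,
      ⟨e0.1, o0.1, hne, by rw [he0c, ho0c]⟩, ?_⟩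
    intro a b _
    have h1 := hetop a
    have h2 := hotop b
    omega
  case pos =>
    rcases E1 with _ | ⟨e1, E2⟩ <;> rcases O1 with _ | ⟨o1, O2⟩
    · -- one value on each side, the same value
      have hsE := mc_single ev e0 hE
      have hsO := mc_single od o0 hO
      refine ⟨max e0.2 o0.2, by simp [pickA, hne], ?_, ?_⟩
      · rcases max_choice e0.2 o0.2 with hm | hm <;> rw [hm]
        · obtain ⟨b, hb, hba⟩ := exists_fresh od e0.1
          exact ⟨e0.1, b, fun h => hba h.symm, by rw [he0c, count_int_zero hb, add_zero]⟩
        · obtain ⟨a, ha, hao⟩ := exists_fresh ev o0.1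
          exact ⟨a, o0.1, hao, by rw [ho0c, count_int_zero ha, zero_add]⟩
      · intro a b hab
        by_cases ha : a = e0.1
        · have hb0 : (od.count b : Int) = 0 :=
            hsO b (fun h => hab (by rw [ha, hne, h]))
          have := hetop a
          have := le_max_left e0.2 o0.2
          omega
        · have ha0 : (ev.count a : Int) = 0 := hsE a ha
          have := hotop b
          have := le_max_right e0.2 o0.2
          omega
    · -- even side has one value (the shared top), odd side at least two
      have hsE := mc_single ev e0 hE
      obtain ⟨⟨ho1m, ho1c⟩, hone⟩ := mc_snd_mem od o0 o1 O2 hO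
      have hsecO := mc_second od o0 o1 O2 hO
      refine ⟨max (e0.2 + o1.2) o0.2, by simp [pickA, hne], ?_, ?_⟩
      · rcases max_choice (e0.2 + o1.2) o0.2 with hm | hm <;> rw [hm]
        · exact ⟨e0.1, o1.1, fun h => hone (hne ▸ h), by rw [he0c, ho1c]⟩
        · obtain ⟨a, ha, hao⟩ := exists_fresh ev o0.1
          exact ⟨a, o0.1, hao, by rw [ho0c, count_int_zero ha, zero_add]⟩
      · intro a b hab
        by_cases ha : a = e0.1
        · have hb1 : (od.count b : Int) ≤ o1.2 :=
            hsecO b (fun h => hab (by rw [ha, hne, h]))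
          have := hetop a
          have := le_max_left (e0.2 + o1.2) o0.2
          omega
        · have ha0 : (ev.count a : Int) = 0 := hsE a ha
          have := hotop b
          have := le_max_right (e0.2 + o1.2) o0.2
          omega
    · -- odd side has one value (the shared top), even side at least two
      have hsO := mc_single od o0 hO
      obtain ⟨⟨he1m, he1c⟩, hene⟩ := mc_snd_mem ev e0 e1 E2 hE
      have hsecE := mc_second ev e0 e1 E2 hE
      refine ⟨max e0.2 (e1.2 + o0.2), by simp [pickA, hne], ?_, ?_⟩
      · rcases max_choice e0.2 (e1.2 + o0.2) with hm | hm <;> rw [hm]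
        · obtain ⟨b, hb, hba⟩ := exists_fresh od e0.1
          exact ⟨e0.1, b, fun h => hba h.symm, by rw [he0c, count_int_zero hb, add_zero]⟩
        · exact ⟨e1.1, o0.1, fun h => hene (hne ▸ h.symm ▸ rfl), by rw [he1c, ho0c]⟩
      · intro a b hab
        by_cases ha : a = e0.1
        · have hb0 : (od.count b : Int) = 0 :=
            hsO b (fun h => hab (by rw [ha, hne, h]))
          have := hetop a
          have := le_max_left e0.2 (e1.2 + o0.2)
          omega
        · have ha1 : (ev.count a : Int) ≤ e1.2 := hsecE a ha
          have := hotop b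
          have := le_max_right e0.2 (e1.2 + o0.2)
          omega
    · -- two or more values on each side, shared top
      obtain ⟨⟨ho1m, ho1c⟩, hone⟩ := mc_snd_mem od o0 o1 O2 hO
      obtain ⟨⟨he1m, he1c⟩, hene⟩ := mc_snd_mem ev e0 e1 E2 hE
      have hsecO := mc_second od o0 o1 O2 hO
      have hsecE := mc_second ev e0 e1 E2 hE
      refine ⟨max (e0.2 + o1.2) (e1.2 + o0.2), by simp [pickA, hne], ?_, ?_⟩
      · rcases max_choice (e0.2 + o1.2) (e1.2 + o0.2) with hm | hm <;> rw [hm]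
        · exact ⟨e0.1, o1.1, fun h => hone (hne ▸ h), by rw [he0c, ho1c]⟩
        · exact ⟨e1.1, o0.1, fun h => hene (hne ▸ h.symm ▸ rfl), by rw [he1c, ho0c]⟩
      · intro a b hab
        by_cases ha : a = e0.1
        · have hb1 : (od.count b : Int) ≤ o1.2 :=
            hsecO b (fun h => hab (by rw [ha, hne, h]))
          have := hetop a
          have := le_max_left (e0.2 + o1.2) (e1.2 + o0.2)
          omega
        · have ha1 : (ev.count a : Int) ≤ e1.2 := hsecE a ha
          have := hotop b
          have := le_max_right (e0.2 + o1.2) (e1.2 + o0.2)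
          omega

-- ===== PORT B: characterisation =====

-- the count array of Source B, with the counter lookup already rewritten to List.count
def fArr (ev keys : List Int) : List Int := keys.map (fun v => (ev.count v : Int))

def loopBest (ev od keys : List Int) : Int :=
  let f := fArr ev keys
  let g := fArr od keys
  max ((PySem.List.max?
      ((List.range keys.length).map (fun i =>
        max ((f.scanl max 0).getD i 0) (((f.reverse.scanl max 0).reverse).getD (i + 1) 0) +
          g.getD i 0))
      (fun x => x)).getD 0)
    ((f.scanl max 0).getD keys.length 0)

lemma bestB_eq_loopBest (ev od : List Int) :
    bestB ev od = loopBest ev od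
      (PySem.List.dedup ((PySem.Dict.counter ev).keys ++ (PySem.Dict.counter od).keys)) := by
  simp [bestB, loopBest, fArr, PySem.Dict.getD_counter]

lemma suf_getD (f : List Int) (i : Nat) (h : i ≤ f.length) :
    ((f.reverse.scanl max 0).reverse).getD i 0 = ((f.drop i).reverse).foldl max 0 := by
  have hi : i < ((f.reverse.scanl max 0).reverse).length := by
    simp; omega
  rw [List.getD_eq_getElem _ _ hi, List.getElem_reverse]
  have e1 : (List.scanl max 0 f.reverse).length - 1 - i = f.length - i := by
    simp
  have e2 := scanl_max_getD f.reverse 0 (f.length - i) (by simp)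
  rw [List.getD_eq_getElem _ _ (by simp)] at e2
  simp only [e1]
  rw [e2, List.take_reverse, Nat.sub_sub_self h]

lemma mem_le_foldl_max (a : Int) (t : List Int) (x : Int) (h : x ∈ a :: t) :
    x ≤ t.foldl max a := by
  rcases List.mem_cons.mp h with rfl | h'
  · exact le_foldl_max_init t x
  · exact le_foldl_max_mem t a x h'

lemma foldl_max_mem_cons (a : Int) (t : List Int) : t.foldl max a ∈ a :: t := by
  rcases foldl_max_cases t a with h | h
  · rw [h]; exact List.mem_cons_self
  · exact List.mem_cons_of_mem a h

-- the i-th term of Source B's final loop, in counting form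
def tFun (ev od keys : List Int) (i : Nat) : Int :=
  max (((fArr ev keys).take i).foldl max 0)
      ((((fArr ev keys).drop (i + 1)).reverse).foldl max 0) +
    (od.count (keys.getD i 0) : Int)

lemma loopBest_clean (ev od keys : List Int) :
    loopBest ev od keys =
      max ((PySem.List.max? ((List.range keys.length).map (tFun ev od keys))
            (fun x => x)).getD 0)
        ((fArr ev keys).foldl max 0) := by
  have hfl : (fArr ev keys).length = keys.length := by simp [fArr]
  have hmap : (List.range keys.length).map (fun i =>
        max (((fArr ev keys).scanl max 0).getD i 0)
            ((((fArr ev keys).reverse.scanl max 0).reverse).getD (i + 1) 0) +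
          (fArr od keys).getD i 0) =
      (List.range keys.length).map (tFun ev od keys) := by
    apply List.map_congr_left
    intro i hi
    have hik : i < keys.length := List.mem_range.mp hi
    have hg : (fArr od keys).getD i 0 = (od.count (keys.getD i 0) : Int) := by
      rw [List.getD_eq_getElem _ _ (by simpa [fArr] using hik),
          List.getD_eq_getElem _ _ hik]
      simp [fArr]
    rw [hg, scanl_max_getD _ 0 i (by rw [hfl]; omega),
        suf_getD _ (i + 1) (by rw [hfl]; omega), tFun]
  simp only [loopBest]
  rw [hmap, scanl_max_getD _ 0 keys.length (le_of_eq hfl.symm),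
      List.take_of_length_le (le_of_eq hfl)]

lemma core_ach_ub (ev od keys : List Int) (hnd : keys.Nodup)
    (hkeys : ∀ v : Int, (v ∈ ev ∨ v ∈ od) → v ∈ keys) :
    AchSum ev od (loopBest ev od keys) ∧ UBSum ev od (loopBest ev od keys) := by
  rw [loopBest_clean]
  have hfl : (fArr ev keys).length = keys.length := by simp [fArr]
  -- even count of any value is bounded by the global maximum of f
  have hMub : ∀ a : Int, (ev.count a : Int) ≤ (fArr ev keys).foldl max 0 := by
    intro a
    by_cases ha : a ∈ ev
    · exact le_foldl_max_mem _ 0 _ (List.mem_map.mpr ⟨a, hkeys a (Or.inl ha), rfl⟩)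
    · rw [count_int_zero ha]; exact le_foldl_max_init _ 0
  -- even count of any value other than keys[i] is bounded by max(pref[i], suf[i+1])
  have hexcl : ∀ (i : Nat), i < keys.length → ∀ a : Int, a ≠ keys.getD i 0 →
      (ev.count a : Int) ≤ max (((fArr ev keys).take i).foldl max 0)
        ((((fArr ev keys).drop (i + 1)).reverse).foldl max 0) := by
    intro i hik a hane
    by_cases ha : a ∈ ev
    · obtain ⟨j, hj, hkj⟩ := List.mem_iff_getElem.mp (hkeys a (Or.inl ha))
      have hji : j ≠ i := by
        intro h
        subst h
        rw [List.getD_eq_getElem _ _ hj] at hane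
        exact hane hkj.symm
      rcases Nat.lt_or_ge j i with hlt | hge
      · have hmem : (ev.count a : Int) ∈ (fArr ev keys).take i := by
          rw [fArr, ← List.map_take]
          refine List.mem_map.mpr ⟨a, ?_, rfl⟩
          have h1 : (keys.take i)[j]'(by simp; omega) = a := by
            rw [List.getElem_take]; exact hkj
          rw [← h1]; exact List.getElem_mem _
        exact le_trans (le_foldl_max_mem _ 0 _ hmem) (le_max_left _ _)
      · have hgt : i + 1 ≤ j := by omega
        have hmem : (ev.count a : Int) ∈ ((fArr ev keys).drop (i + 1)).reverse := by
          rw [List.mem_reverse, fArr, ← List.map_drop]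
          refine List.mem_map.mpr ⟨a, ?_, rfl⟩
          have h1 : (keys.drop (i + 1))[j - (i + 1)]'(by simp; omega) = a := by
            simp only [List.getElem_drop, Nat.add_sub_cancel' hgt]
            exact hkj
          rw [← h1]; exact List.getElem_mem _
        exact le_trans (le_foldl_max_mem _ 0 _ hmem) (le_max_right _ _)
    · rw [count_int_zero ha]
      exact le_trans (le_foldl_max_init _ 0) (le_max_left _ _)
  constructor
  · -- achievability
    rcases hL : (List.range keys.length).map (tFun ev od keys) with _ | ⟨c0, ct⟩
    · -- no keys at all: both partitions are empty
      have hk0 : keys = [] := by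
        rcases keys with _ | ⟨k0, kr⟩
        · rfl
        · simp at hL
      have hev0 : ev = [] :=
        List.eq_nil_iff_forall_not_mem.mpr fun x hx => by
          simpa [hk0] using hkeys x (Or.inl hx)
      have hod0 : od = [] :=
        List.eq_nil_iff_forall_not_mem.mpr fun x hx => by
          simpa [hk0] using hkeys x (Or.inr hx)
      obtain ⟨a, ha, _⟩ := exists_fresh ev 0
      obtain ⟨b, hb, hba⟩ := exists_fresh od a
      refine ⟨a, b, fun h => hba h.symm, ?_⟩
      simp [hk0, fArr, hev0, hod0, PySem.List.max?]
    · have hmax : (PySem.List.max? (c0 :: ct) (fun x => x)).getD 0 = ct.foldl max c0 := by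
        rw [PySem.List.max?_id_cons]; rfl
      rw [hmax]
      rcases max_choice (ct.foldl max c0) ((fArr ev keys).foldl max 0) with hm | hm <;> rw [hm]
      · -- the maximum comes from the index loop
        have hbm : ct.foldl max c0 ∈ c0 :: ct := foldl_max_mem_cons c0 ct
        rw [← hL] at hbm
        obtain ⟨i, hi, hti⟩ := List.mem_map.mp hbm
        have hik : i < keys.length := List.mem_range.mp hi
        rw [← hti, tFun]
        have hft : (fArr ev keys).take i = (keys.take i).map (fun v => (ev.count v : Int)) := by
          simp [fArr, List.map_take]
        have hfd : (fArr ev keys).drop (i + 1) = (keys.drop (i + 1)).map (fun v => (ev.count v : Int)) := by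
          simp [fArr, List.map_drop]
        rcases max_choice (((fArr ev keys).take i).foldl max 0)
            ((((fArr ev keys).drop (i + 1)).reverse).foldl max 0) with hm2 | hm2 <;> rw [hm2]
        · rcases foldl_max_cases ((fArr ev keys).take i) 0 with h0 | hmem
          · obtain ⟨a, ha, hane⟩ := exists_fresh ev (keys.getD i 0)
            exact ⟨a, keys.getD i 0, hane, by rw [h0, count_int_zero ha]⟩
          · rw [hft] at hmem
            obtain ⟨v, hv, hveq⟩ := List.mem_map.mp hmem
            obtain ⟨j, hj, hkj⟩ := List.mem_iff_getElem.mp hv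
            have hjlt : j < i := by have h := hj; simp at h; omega
            have hjk : j < keys.length := by have h := hj; simp at h; omega
            have hvne : v ≠ keys.getD i 0 := by
              rw [List.getD_eq_getElem _ _ hik]
              rw [← hkj, List.getElem_take]
              intro h
              have := (List.Nodup.getElem_inj_iff hnd).mp h
              omega
            exact ⟨v, keys.getD i 0, hvne, by rw [hft, ← hveq]⟩
        · rcases foldl_max_cases (((fArr ev keys).drop (i + 1)).reverse) 0 with h0 | hmem
          · obtain ⟨a, ha, hane⟩ := exists_fresh ev (keys.getD i 0)
            exact ⟨a, keys.getD i 0, hane, by rw [h0, count_int_zero ha]⟩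
          · rw [hfd, List.mem_reverse] at hmem
            obtain ⟨v, hv, hveq⟩ := List.mem_map.mp hmem
            obtain ⟨m, hm2', hkm⟩ := List.mem_iff_getElem.mp hv
            have hm3 : i + 1 + m < keys.length := by have h := hm2'; simp at h; omega
            rw [List.getElem_drop] at hkm
            have hvne : v ≠ keys.getD i 0 := by
              rw [List.getD_eq_getElem _ _ hik]
              rw [← hkm]
              intro h
              have := (List.Nodup.getElem_inj_iff hnd).mp h
              omega
            exact ⟨v, keys.getD i 0, hvne, by rw [hfd, ← hveq]⟩
      · -- the maximum is the global even maximum (odd side goes to a fresh value)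
        rcases foldl_max_cases (fArr ev keys) 0 with h0 | hmem
        · obtain ⟨a, ha, _⟩ := exists_fresh ev 0
          obtain ⟨b, hb, hba⟩ := exists_fresh od a
          exact ⟨a, b, fun h => hba h.symm, by
            rw [h0, count_int_zero ha, count_int_zero hb]; norm_num⟩
        · obtain ⟨v, hv, hveq⟩ := List.mem_map.mp hmem
          obtain ⟨b, hb, hba⟩ := exists_fresh od v
          exact ⟨v, b, fun h => hba h.symm, by rw [← hveq, count_int_zero hb, add_zero]⟩
  · -- upper bound
    intro a b hab
    by_cases hbk : b ∈ keys
    · obtain ⟨i, hik, hbi⟩ := List.mem_iff_getElem.mp hbk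
      have hvi : keys.getD i 0 = b := by rw [List.getD_eq_getElem _ _ hik]; exact hbi
      have h1 := hexcl i hik a (by rw [hvi]; exact hab)
      rcases hL : (List.range keys.length).map (tFun ev od keys) with _ | ⟨c0, ct⟩
      · exfalso
        have : tFun ev od keys i ∈ (List.range keys.length).map (tFun ev od keys) :=
          List.mem_map_of_mem (List.mem_range.mpr hik)
        rw [hL] at this
        simp at this
      · have hmax : (PySem.List.max? (c0 :: ct) (fun x => x)).getD 0 = ct.foldl max c0 := by
          rw [PySem.List.max?_id_cons]; rfl
        rw [hmax]
        have hTi : tFun ev od keys i ≤ ct.foldl max c0 := by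
          apply mem_le_foldl_max
          rw [← hL]
          exact List.mem_map_of_mem (List.mem_range.mpr hik)
        have h3 : tFun ev od keys i =
            max (((fArr ev keys).take i).foldl max 0)
              ((((fArr ev keys).drop (i + 1)).reverse).foldl max 0) + (od.count b : Int) := by
          rw [tFun, hvi]
        have h4 := le_max_left (ct.foldl max c0) ((fArr ev keys).foldl max 0)
        omega
    · have hbo : b ∉ od := fun h => hbk (hkeys b (Or.inr h))
      have h1 := hMub a
      have h4 := le_max_right ((PySem.List.max?
          ((List.range keys.length).map (tFun ev od keys)) (fun x => x)).getD 0)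
        ((fArr ev keys).foldl max 0)
      rw [count_int_zero hbo]
      omega

lemma bestB_ach_ub (ev od : List Int) :
    AchSum ev od (bestB ev od) ∧ UBSum ev od (bestB ev od) := by
  rw [bestB_eq_loopBest]
  apply core_ach_ub
  · exact PySem.List.nodup_dedup _
  · intro v hv
    rw [PySem.List.mem_dedup]
    rcases hv with h | h
    · exact List.mem_append.mpr (Or.inl (by
        rw [PySem.Dict.keys_counter]; exact (PySem.Set.mem_ofList _ _).mpr h))
    · exact List.mem_append.mpr (Or.inr (by
        rw [PySem.Dict.keys_counter]; exact (PySem.Set.mem_ofList _ _).mpr h))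

-- ===== VERDICT (by name: the statement is the Claim_ definition above) =====
theorem solve_spec : Claim_equal_solve := by
  intro N V _ hPre
  obtain ⟨h2, hlen⟩ := hPre
  unfold Spec_solve
  show solve N V = solve_alt N V
  simp only [solve, solve_alt]
  have hE : ((PySem.List.pyRange 0 N 2).map (fun i => (PySem.List.pyGet? V i).getD 0)) ≠ [] := by
    have h0 : (0 : Int) ∈ PySem.List.pyRange 0 N 2 := by
      rw [PySem.List.mem_pyRange_iff_of_pos (by omega : (0:Int) < 2)]
      omega
    intro hc
    rw [List.map_eq_nil_iff] at hc
    rw [hc] at h0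
    simp at h0
  have hO : ((PySem.List.pyRange 1 N 2).map (fun i => (PySem.List.pyGet? V i).getD 0)) ≠ [] := by
    have h1 : (1 : Int) ∈ PySem.List.pyRange 1 N 2 := by
      rw [PySem.List.mem_pyRange_iff_of_pos (by omega : (0:Int) < 2)]
      omega
    intro hc
    rw [List.map_eq_nil_iff] at hc
    rw [hc] at h1
    simp at h1
  obtain ⟨X, hX, hAX, hUX⟩ := pickA_ach_ub N _ _ hE hO
  have hB := bestB_ach_ub ((PySem.List.pyRange 0 N 2).map (fun i => (PySem.List.pyGet? V i).getD 0))
    ((PySem.List.pyRange 1 N 2).map (fun i => (PySem.List.pyGet? V i).getD 0))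
  rw [hX]
  congr 1
  exact ach_ub_unique hAX hUX hB.1 hB.2
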